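-- pv_equiv track=rewrite | github.com/abulaysov/hyperskill | NaturalLanguageProcessing/Generating Randomness/predicator.py | triad
-- ===== SOURCE A (Python) =====
-- def triad(tr, s):
--     result, ind = [0, 0], 0
--     try:
--         while True:
--             ind = s.find(tr, ind)
--             if ind == -1:
--                 break
--             if s[ind+3] == '0':
--                 result[0] += 1
--             else:
--                 result[1] += 1
--             ind += 1
--     except IndexError:
--         return result
--     return result
-- ===== SOURCE B (Python) =====
-- def triad(tr, s):
--     result = [0, 0]
--     for i in range(len(s) - 3):
--         if s.startswith(tr, i):
--             if s[i + 3] == '0':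
--                 result[0] += 1
--             else:
--                 result[1] += 1
--     return result
-- ===== Notes on version B (the rewrite author's own statement) =====
-- stated objective: simpler
-- what changed: Replaced A's while-True loop over repeated s.find(tr, ind) with try/except-IndexError control flow by a single for-loop over range(len(s)-3) using s.startswith(tr, i); the range bound encodes the end-of-string cutoff that A reaches via the IndexError handler.
import Mathlib
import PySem

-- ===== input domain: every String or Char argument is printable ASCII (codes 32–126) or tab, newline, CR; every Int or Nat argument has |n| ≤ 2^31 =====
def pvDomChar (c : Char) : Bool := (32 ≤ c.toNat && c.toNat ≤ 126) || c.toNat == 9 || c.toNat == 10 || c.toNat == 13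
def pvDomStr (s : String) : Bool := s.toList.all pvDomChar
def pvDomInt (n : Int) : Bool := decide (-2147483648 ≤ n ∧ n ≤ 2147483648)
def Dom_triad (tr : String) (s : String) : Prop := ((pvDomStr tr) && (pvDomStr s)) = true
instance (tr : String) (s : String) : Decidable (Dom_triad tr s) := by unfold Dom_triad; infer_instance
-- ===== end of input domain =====

-- B replaces A's repeated s.find loop + try/except IndexError with a single index scan
-- over range(len(s)-3) using startswith (objective: simpler).


-- ===== PORT A =====
-- A's while-True loop over ind = s.find(tr, ind); the fuel argument only makes the
-- recursion total — the initial fuel len(s)+2 is proved sufficient below (ind strictly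
-- increases each pass and only positions < len(s) recurse). The 2-element list `result`
-- is carried as the two accumulators r0, r1 and rebuilt on every return.
def triadGo (tr s : List Char) (fuel : Nat) (ind r0 r1 : Int) : List Int :=
  match fuel with
  | 0 => [r0, r1]   -- unreachable with the initial fuel
  | fuel + 1 =>
    let f := PySem.Chars.findFrom s tr ind none   -- ind = s.find(tr, ind)
    if f = -1 then [r0, r1]                       -- break
    else
      match PySem.List.pyGet? s (f + 3) with      -- s[ind+3]
      | none => [r0, r1]                          -- IndexError: return result
      | some c =>
        if c = '0' then triadGo tr s fuel (f + 1) (r0 + 1) r1   -- result[0] += 1; ind += 1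
        else triadGo tr s fuel (f + 1) r0 (r1 + 1)              -- result[1] += 1; ind += 1

def triad (tr : String) (s : String) : List Int :=
  triadGo tr.toList s.toList (s.toList.length + 2) 0 0 0

-- ===== PORT B =====
-- Source B's for-loop over range(len(s)-3); s.startswith(tr, i) with 0 ≤ i is exactly
-- startswith on s.drop i (exact: i ranges over 0 ≤ i < len(s)-3 here).
def triad_alt (tr : String) (s : String) : List Int :=
  let n : Int := s.toList.length
  let p := (PySem.List.pyRange 0 (n - 3) 1).foldl
    (fun (acc : Int × Int) i =>
      if PySem.Chars.startswith (s.toList.drop i.toNat) tr.toList then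
        if PySem.List.pyGetD s.toList (i + 3) ' ' = '0' then (acc.1 + 1, acc.2)
        else (acc.1, acc.2 + 1)
      else acc) (0, 0)
  [p.1, p.2]

-- ===== PRECONDITION & SPEC =====
def Spec_triad (tr : String) (s : String) (out : List Int) : Prop := out = triad_alt tr s
instance (tr : String) (s : String) (out : List Int) : Decidable (Spec_triad tr s out) := by unfold Spec_triad; infer_instance

-- ===== CLAIM (what is proved, stated in full; the proofs are below) =====
def Claim_equal_triad : Prop := ∀ (tr : String) (s : String), Dom_triad tr s → Spec_triad tr s (triad tr s)

-- ===== LEMMAS AND PROOFS =====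

-- per-index predicates: a match of tr at i whose following char s[i+3] is / is not '0'
def hit0 (tr s : List Char) (i : Nat) : Bool :=
  PySem.Chars.startswith (s.drop i) tr && (PySem.List.pyGetD s ((i : Int) + 3) ' ' == '0')
def hit1 (tr s : List Char) (i : Nat) : Bool :=
  PySem.Chars.startswith (s.drop i) tr && !(PySem.List.pyGetD s ((i : Int) + 3) ' ' == '0')

-- signed counts over a list of candidate indices
def cnt0 (tr s : List Char) (l : List Nat) : Int := (l.countP (hit0 tr s) : Int)
def cnt1 (tr s : List Char) (l : List Nat) : Int := (l.countP (hit1 tr s) : Int)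

-- B's fold computes the two counts (shifted by the accumulator)
theorem foldB_eq (tr s : List Char) (l : List Nat) (a b : Int) :
    (l.map (fun n : Nat => (n : Int))).foldl
      (fun (acc : Int × Int) i =>
        if PySem.Chars.startswith (s.drop i.toNat) tr then
          if PySem.List.pyGetD s (i + 3) ' ' = '0' then (acc.1 + 1, acc.2)
          else (acc.1, acc.2 + 1)
        else acc) (a, b)
    = (a + cnt0 tr s l, b + cnt1 tr s l) := by
  induction l generalizing a b with
  | nil => simp [cnt0, cnt1]
  | cons x xs ih =>
    rw [List.map_cons, List.foldl_cons]
    have htn : ((x : Int)).toNat = x := rfl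
    by_cases h1 : PySem.Chars.startswith (s.drop x) tr
    · by_cases h2 : PySem.List.pyGetD s ((x : Int) + 3) ' ' = '0'
      · rw [if_pos (htn ▸ h1), if_pos h2, ih]
        simp [cnt0, cnt1, hit0, hit1, h1, h2]
        ring
      · rw [if_pos (htn ▸ h1), if_neg h2, ih]
        simp [cnt0, cnt1, hit0, hit1, h1, h2]
        ring
    · rw [if_neg (htn ▸ h1), ih]
      simp [cnt0, cnt1, hit0, hit1, h1]

-- no match at any index ≥ k once the search from k finds nothing
theorem no_hit_of_not_infix (tr s : List Char) (k i : Nat) (hki : k ≤ i)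
    (h : ¬ tr <:+: s.drop k) : ¬ tr <+: s.drop i := by
  intro hp
  apply h
  have hd : s.drop i = (s.drop k).drop (i - k) := by
    rw [List.drop_drop]; congr 1; omega
  rw [hd] at hp
  exact hp.isInfix.trans (List.drop_suffix _ _).isInfix

-- counts vanish on an index list with no prefix match
theorem cnt0_eq_zero (tr s : List Char) (l : List Nat)
    (h : ∀ i ∈ l, ¬ tr <+: s.drop i) : cnt0 tr s l = 0 := by
  unfold cnt0
  rw [List.countP_eq_zero.mpr]
  · rfl
  · intro i hi
    simp only [hit0, Bool.and_eq_true, not_and]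
    intro hs
    exact absurd ((PySem.Chars.startswith_iff _ _).mp hs) (h i hi)

theorem cnt1_eq_zero (tr s : List Char) (l : List Nat)
    (h : ∀ i ∈ l, ¬ tr <+: s.drop i) : cnt1 tr s l = 0 := by
  unfold cnt1
  rw [List.countP_eq_zero.mpr]
  · rfl
  · intro i hi
    simp only [hit1, Bool.and_eq_true, not_and]
    intro hs
    exact absurd ((PySem.Chars.startswith_iff _ _).mp hs) (h i hi)

-- loop invariant for A: started at position k, the loop adds exactly the counts over [k, n-3)
theorem triadGo_eq (tr s : List Char) (fuel : Nat) :
    ∀ (k : Nat) (r0 r1 : Int), k ≤ s.length → s.length + 2 ≤ fuel + k →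
    triadGo tr s fuel (k : Int) r0 r1
      = [r0 + cnt0 tr s (List.range' k (s.length - 3 - k)),
         r1 + cnt1 tr s (List.range' k (s.length - 3 - k))] := by
  induction fuel with
  | zero => intro k r0 r1 hk hfuel; omega
  | succ fuel ih =>
    intro k r0 r1 hk hfuel
    simp only [triadGo]
    by_cases hf : PySem.Chars.findFrom s tr (k : Int) none = -1
    · -- no further match at all: counts over [k, n-3) are zero
      have hno : ¬ tr <:+: s.drop k :=
        (PySem.Chars.findFrom_natCast_eq_neg_one_iff s tr k hk).mp hf
      have hz : ∀ i ∈ List.range' k (s.length - 3 - k), ¬ tr <+: s.drop i := by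
        intro i hi
        have := List.mem_range'.mp hi
        exact no_hit_of_not_infix tr s k i (by omega) hno
      rw [if_pos hf, cnt0_eq_zero tr s _ hz, cnt1_eq_zero tr s _ hz]
      simp
    · rw [if_neg hf]
      obtain ⟨hkf, hpre, hmin⟩ := PySem.Chars.findFrom_natCast_spec s tr k hk hf
      set f := PySem.Chars.findFrom s tr (k : Int) none with hfdef
      have hf0 : (0 : Int) ≤ f := le_trans (by exact_mod_cast Int.natCast_nonneg k) hkf
      set F := f.toNat with hFdef
      have hfF : f = (F : Int) := by omega
      have hkF : k ≤ F := by omega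
      -- no match strictly between k and F
      have hgap : ∀ i ∈ List.range' k (F - k), ¬ tr <+: s.drop i := by
        intro i hi
        have := List.mem_range'.mp hi
        exact hmin i (by omega) (by omega)
      rcases hmatch : PySem.List.pyGet? s (f + 3) with _ | c
      · -- s[f+3] raises IndexError: everything in [k, n-3) is < n-3 ≤ F, hence unmatched
        have hdead : ¬ PySem.Raise.InRange s.length (f + 3) :=
          (PySem.List.pyGet?_eq_none_iff s (f + 3)).mp hmatch
        have hbig : s.length ≤ F + 3 := by
          unfold PySem.Raise.InRange at hdead
          omega
        have hz : ∀ i ∈ List.range' k (s.length - 3 - k), ¬ tr <+: s.drop i := by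
          intro i hi
          have := List.mem_range'.mp hi
          exact hmin i (by omega) (by omega)
        show [r0, r1] = _
        rw [cnt0_eq_zero tr s _ hz, cnt1_eq_zero tr s _ hz]
        simp
      · -- s[f+3] exists: count the match at F, recurse from F+1
        show (if c = '0' then triadGo tr s fuel (f + 1) (r0 + 1) r1
              else triadGo tr s fuel (f + 1) r0 (r1 + 1)) = _
        have hcast3 : f + 3 = ((F + 3 : Nat) : Int) := by omega
        have hsome : s[F + 3]? = some c := by
          rw [hcast3, PySem.List.pyGet?_natCast] at hmatch
          exact hmatch
        have hbig : F + 3 < s.length := (List.getElem?_eq_some_iff.mp hsome).1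
        have hcval : PySem.List.pyGetD s ((F : Int) + 3) ' ' = c := by
          have h1 : ((F : Int) + 3) = ((F + 3 : Nat) : Int) := by push_cast; ring
          rw [h1, PySem.List.pyGetD_natCast, List.getD_eq_getElem?_getD, hsome]
          rfl
        have hhit : PySem.Chars.startswith (s.drop F) tr = true :=
          (PySem.Chars.startswith_iff _ _).mpr hpre
        -- split the index range: [k, n-3) = [k, F) ++ F :: [F+1, n-3)
        have hsplit : List.range' k (s.length - 3 - k)
            = List.range' k (F - k) ++ F :: List.range' (F + 1) (s.length - 3 - (F + 1)) := by
          have h1 : List.range' F (s.length - 3 - F)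
              = F :: List.range' (F + 1) (s.length - 3 - (F + 1)) := by
            have h2 : s.length - 3 - F = (s.length - 3 - (F + 1)) + 1 := by omega
            rw [h2, List.range'_succ]
          rw [← h1]
          have h3 : List.range' k (F - k) ++ List.range' (k + 1 * (F - k)) (s.length - 3 - F) 1
              = List.range' k ((F - k) + (s.length - 3 - F)) 1 := List.range'_append
          have h4 : k + 1 * (F - k) = F := by omega
          have h5 : (F - k) + (s.length - 3 - F) = s.length - 3 - k := by omega
          rw [h4, h5] at h3
          exact h3.symm
        have hc0 : cnt0 tr s (List.range' k (s.length - 3 - k))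
            = (if c = '0' then 1 else 0)
              + cnt0 tr s (List.range' (F + 1) (s.length - 3 - (F + 1))) := by
          rw [hsplit]
          unfold cnt0
          rw [List.countP_append, List.countP_cons]
          rw [List.countP_eq_zero.mpr]
          · simp only [hit0, hhit, Bool.true_and, hcval, Nat.zero_add]
            by_cases hz : c = '0' <;> (simp [hz]; try ring)
          · intro i hi
            simp only [hit0, Bool.and_eq_true, not_and]
            intro hs
            exact absurd ((PySem.Chars.startswith_iff _ _).mp hs) (hgap i hi)
        have hc1 : cnt1 tr s (List.range' k (s.length - 3 - k))
            = (if c = '0' then 0 else 1)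
              + cnt1 tr s (List.range' (F + 1) (s.length - 3 - (F + 1))) := by
          rw [hsplit]
          unfold cnt1
          rw [List.countP_append, List.countP_cons]
          rw [List.countP_eq_zero.mpr]
          · simp only [hit1, hhit, Bool.true_and, hcval, Nat.zero_add]
            by_cases hz : c = '0' <;> (simp [hz]; try ring)
          · intro i hi
            simp only [hit1, Bool.and_eq_true, not_and]
            intro hs
            exact absurd ((PySem.Chars.startswith_iff _ _).mp hs) (hgap i hi)
        have hstep : f + 1 = ((F + 1 : Nat) : Int) := by omega
        by_cases hz : c = '0'
        · rw [if_pos hz] at hc0 hc1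
          rw [if_pos hz, hstep,
            ih (F + 1) (r0 + 1) r1 (by omega) (by omega), hc0, hc1]
          simp only [List.cons.injEq, and_true]
          constructor
          · ring
          · ring
        · rw [if_neg hz] at hc0 hc1
          rw [if_neg hz, hstep,
            ih (F + 1) r0 (r1 + 1) (by omega) (by omega), hc0, hc1]
          simp only [List.cons.injEq, and_true]
          constructor
          · ring
          · ring

-- ===== VERDICT (by name: the statement is the Claim_ definition above) =====
theorem triad_spec : Claim_equal_triad := by
  intro tr s _
  unfold Spec_triad triad triad_alt
  have hA := triadGo_eq tr.toList s.toList (s.toList.length + 2) 0 0 0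
    (Nat.zero_le _) (by omega)
  simp only [Nat.cast_zero] at hA
  rw [hA]
  have hr : PySem.List.pyRange 0 ((s.toList.length : Int) - 3) 1
      = (List.range (s.toList.length - 3)).map (fun n : Nat => (n : Int)) := by
    rw [PySem.List.pyRange_one]
    have h1 : (((s.toList.length : Int) - 3) - 0).toNat = s.toList.length - 3 := by omega
    rw [h1]
    exact List.map_congr_left (fun a _ => by omega)
  simp only [hr]
  rw [foldB_eq]
  simp only [List.range_eq_range', Nat.sub_zero, zero_add]
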